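-- pv_equiv track=rewrite | github.com/malikrohail/mirror | backend/app/core/analyzer.py | _group_steps_into_flows
-- ===== SOURCE A (Python) =====
-- from typing import Any
--
-- def _group_steps_into_flows(
--     steps: list[dict[str, Any]],
-- ) -> dict[str, list[dict[str, Any]]]:
--     """Group consecutive steps into named flows based on URL patterns."""
--     if not steps:
--         return {}
--
--     flows: dict[str, list[dict[str, Any]]] = {}
--     current_flow: list[dict[str, Any]] = []
--     seen_urls: list[str] = []
--
--     for step in steps:
--         url = step.get("page_url", "")
--         if url not in seen_urls:
--             seen_urls.append(url)
--             current_flow.append(step)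
--         elif current_flow:
--             # URL repeated — end current flow
--             flow_name = f"flow_{len(flows) + 1}"
--             if len(current_flow) >= 2:
--                 flows[flow_name] = current_flow
--             current_flow = [step]
--             seen_urls = [url]
--
--     if len(current_flow) >= 2:
--         flows[f"flow_{len(flows) + 1}"] = current_flow
--
--     return flows
-- ===== SOURCE B (Python) =====
-- from typing import Any
--
--
-- def _group_steps_into_flows(
--     steps: list[dict[str, Any]],
-- ) -> dict[str, list[dict[str, Any]]]:
--     """Group consecutive steps into named flows based on URL patterns.
--
--     Recursive peeling: repeatedly split off the longest prefix of the
--     remaining steps whose URLs are pairwise distinct, then name and keep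
--     that slice if it has at least two steps.  No streaming accumulator
--     state (flows/current/seen) is threaded through a single loop.
--     """
--
--     def distinct_prefix_len(rest: list[dict[str, Any]]) -> int:
--         """Length of the longest prefix of `rest` with pairwise-distinct URLs."""
--         urls: set[str] = set()
--         for i, step in enumerate(rest):
--             u = step.get("page_url", "")
--             if u in urls:
--                 return i
--             urls.add(u)
--         return len(rest)
--
--     flows: dict[str, list[dict[str, Any]]] = {}
--     rest = steps
--     while rest:
--         i = distinct_prefix_len(rest)
--         seg, rest = rest[:i], rest[i:]
--         if len(seg) >= 2:
--             flows[f"flow_{len(flows) + 1}"] = seg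
--     return flows
-- ===== Notes on version B (the rewrite author's own statement) =====
-- stated objective: alternative
-- what changed: A streams once over the steps threading (flows, current_flow, seen_urls) accumulator state and names flows on the fly; B recursively peels the step list by computing the length of the longest distinct-URL prefix of the remainder, slicing it off, and naming the slice if it has at least two steps.
import Mathlib
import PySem

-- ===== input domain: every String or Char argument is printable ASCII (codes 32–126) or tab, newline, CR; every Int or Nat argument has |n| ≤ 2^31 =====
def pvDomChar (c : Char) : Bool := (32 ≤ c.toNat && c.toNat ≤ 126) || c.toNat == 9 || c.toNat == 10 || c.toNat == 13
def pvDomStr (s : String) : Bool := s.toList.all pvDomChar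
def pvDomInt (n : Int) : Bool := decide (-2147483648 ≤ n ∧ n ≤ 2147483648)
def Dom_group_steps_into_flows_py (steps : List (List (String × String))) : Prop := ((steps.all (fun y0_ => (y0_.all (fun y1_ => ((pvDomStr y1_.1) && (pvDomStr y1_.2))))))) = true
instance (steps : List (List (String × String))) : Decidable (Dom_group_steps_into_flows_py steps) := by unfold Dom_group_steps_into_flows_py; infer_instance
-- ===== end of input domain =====

-- B replaces A's single streaming loop with (flows, current, seen) accumulator state by
-- recursive peeling: compute the longest distinct-URL prefix length of the remainder,
-- slice it off, keep it when it has at least two steps; same return value, no speed claim.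

-- ===== PORT A =====
-- loop body of A: state = (flows dict, current_flow, seen_urls list)
def gsA_body (s : PySem.Dict String (List (List (String × String))) × List (List (String × String)) × List String)
    (step : List (String × String)) :
    PySem.Dict String (List (List (String × String))) × List (List (String × String)) × List String :=
  let url := PySem.Dict.getD ⟨step⟩ "page_url" ""
  if url ∉ s.2.2 then (s.1, s.2.1 ++ [step], s.2.2 ++ [url])
  else if s.2.1 ≠ [] then
    let flows' := if s.2.1.length ≥ 2 then
        PySem.Dict.insert s.1 ("flow_" ++ PySem.Int.toStr ((s.1.size : Int) + 1)) s.2.1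
      else s.1
    (flows', [step], [url])
  else s

def group_steps_into_flows_py (steps : List (List (String × String))) :
    List (String × List (List (String × String))) :=
  if steps = [] then []
  else
    let s := steps.foldl gsA_body (PySem.Dict.mk [], [], [])
    let flows := if s.2.1.length ≥ 2 then
        PySem.Dict.insert s.1 ("flow_" ++ PySem.Int.toStr ((s.1.size : Int) + 1)) s.2.1
      else s.1
    flows.items

-- ===== PORT B =====
-- distinct_prefix_len: length of the longest prefix of `rest` whose urls are pairwise
-- distinct (the enumerate loop returns the first index whose url is already in the set)
def gsB_cut (rest : List (List (String × String))) (urls : PySem.Set String) : Nat :=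
  match rest with
  | [] => 0
  | step :: r =>
    let u := PySem.Dict.getD ⟨step⟩ "page_url" ""
    if PySem.Set.contains urls u then 0 else 1 + gsB_cut r (PySem.Set.add urls u)

-- the cut is positive on a nonempty list with an empty url set (cited by the termination proof)
lemma gsB_cut_pos (s : List (String × String)) (r : List (List (String × String))) :
    1 ≤ gsB_cut (s :: r) PySem.Set.empty := by
  simp [gsB_cut, PySem.Set.contains, PySem.Set.empty]

-- the while loop: peel the first distinct-url slice off `rest`, name it if len >= 2
def gsB_loop : List (List (String × String)) →
    PySem.Dict String (List (List (String × String))) →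
    List (String × List (List (String × String)))
  | [], flows => flows.items
  | s :: r, flows =>
    let seg := (s :: r).take (gsB_cut (s :: r) PySem.Set.empty)
    let flows' := if seg.length ≥ 2 then
        PySem.Dict.insert flows ("flow_" ++ PySem.Int.toStr ((flows.size : Int) + 1)) seg
      else flows
    gsB_loop ((s :: r).drop (gsB_cut (s :: r) PySem.Set.empty)) flows'
termination_by rest _ => rest.length
decreasing_by
  simp only [List.length_drop, List.length_cons]
  have := gsB_cut_pos s r
  omega

def group_steps_into_flows_py_alt (steps : List (List (String × String))) :
    List (String × List (List (String × String))) :=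
  gsB_loop steps (PySem.Dict.mk [])

-- ===== PRECONDITION & SPEC =====
def Spec_group_steps_into_flows_py (steps : List (List (String × String))) (out : List (String × List (List (String × String)))) : Prop := out = group_steps_into_flows_py_alt steps
instance (steps : List (List (String × String))) (out : List (String × List (List (String × String)))) : Decidable (Spec_group_steps_into_flows_py steps out) := by unfold Spec_group_steps_into_flows_py; infer_instance

-- ===== CLAIM (what is proved, stated in full; the proofs are below) =====
def Claim_equal_group_steps_into_flows_py : Prop := ∀ (steps : List (List (String × String))), Dom_group_steps_into_flows_py steps → Spec_group_steps_into_flows_py steps (group_steps_into_flows_py steps)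

-- ===== LEMMAS AND PROOFS =====

-- Bridge: A's fold from a mid-segment state (flows, cur, seen) with cur nonempty produces
-- the same dict items as B peeling the rest: the next cut point relative to `seen`
-- closes the segment cur ++ rest.take i, and B's loop continues on rest.drop i.
lemma gs_bridge : ∀ (rest : List (List (String × String)))
    (flows : PySem.Dict String (List (List (String × String))))
    (cur : List (List (String × String))) (seen : List String),
    cur ≠ [] →
    (let s := rest.foldl gsA_body (flows, cur, seen)
     (if s.2.1.length ≥ 2 then
        PySem.Dict.insert s.1 ("flow_" ++ PySem.Int.toStr ((s.1.size : Int) + 1)) s.2.1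
      else s.1).items)
    = (let i := gsB_cut rest seen
       let seg := cur ++ rest.take i
       let flows' := if seg.length ≥ 2 then
           PySem.Dict.insert flows ("flow_" ++ PySem.Int.toStr ((flows.size : Int) + 1)) seg
         else flows
       gsB_loop (rest.drop i) flows') := by
  intro rest
  induction rest with
  | nil =>
    intro flows cur seen _
    simp [gsB_cut, gsB_loop.eq_def]
  | cons s r ih =>
    intro flows cur seen hcur
    by_cases hmem : PySem.Dict.getD ⟨s⟩ "page_url" "" ∈ seen
    · -- url repeated: A closes the segment here; B's cut is 0 and its loop re-cuts at s
      have hA : gsA_body (flows, cur, seen) s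
          = ((if cur.length ≥ 2 then
                PySem.Dict.insert flows ("flow_" ++ PySem.Int.toStr ((flows.size : Int) + 1)) cur
              else flows), [s], [PySem.Dict.getD ⟨s⟩ "page_url" ""]) := by
        simp only [gsA_body]
        rw [if_neg (by simpa using hmem), if_pos hcur]
      have hcut : gsB_cut (s :: r) seen = 0 := by
        simp [gsB_cut, hmem]
      simp only [List.foldl, hA, hcut, List.take_zero, List.drop_zero, List.append_nil]
      rw [ih _ [s] [PySem.Dict.getD ⟨s⟩ "page_url" ""] (by simp)]
      rw [gsB_loop]
      simp only [gsB_cut, PySem.Set.contains, PySem.Set.empty, List.elem_nil, Bool.false_eq_true,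
        if_false]
      simp [Nat.one_add, List.take_succ_cons, List.drop_succ_cons]
    · -- url fresh: both extend the current segment
      have hA : gsA_body (flows, cur, seen) s
          = (flows, cur ++ [s], seen ++ [PySem.Dict.getD ⟨s⟩ "page_url" ""]) := by
        simp only [gsA_body]
        rw [if_pos hmem]
      have hcut : gsB_cut (s :: r) seen
          = 1 + gsB_cut r (seen ++ [PySem.Dict.getD ⟨s⟩ "page_url" ""]) := by
        simp [gsB_cut, hmem]
      simp only [List.foldl, hA, hcut]
      rw [ih _ (cur ++ [s]) (seen ++ [PySem.Dict.getD ⟨s⟩ "page_url" ""]) (by simp)]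
      simp [List.take_succ_cons, List.drop_succ_cons, Nat.add_comm 1]

-- ===== VERDICT (by name: the statement is the Claim_ definition above) =====
theorem group_steps_into_flows_py_spec : Claim_equal_group_steps_into_flows_py := by
  intro steps _
  unfold Spec_group_steps_into_flows_py group_steps_into_flows_py group_steps_into_flows_py_alt
  cases steps with
  | nil => simp [gsB_loop.eq_def]
  | cons s r =>
    simp only [reduceCtorEq, if_false, List.foldl]
    have hA : gsA_body (PySem.Dict.mk [], [], []) s
        = (PySem.Dict.mk [], [s], [PySem.Dict.getD ⟨s⟩ "page_url" ""]) := by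
      simp [gsA_body]
    rw [hA, gs_bridge r (PySem.Dict.mk []) [s] [PySem.Dict.getD ⟨s⟩ "page_url" ""] (by simp)]
    rw [gsB_loop]
    simp only [gsB_cut, PySem.Set.contains, PySem.Set.empty, List.elem_nil, Bool.false_eq_true,
      if_false]
    simp [Nat.one_add, List.take_succ_cons, List.drop_succ_cons]
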